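-- pv_equiv track=rewrite | github.com/lwq246/DeepResearch-Agent | backend/graph.py | prefers_web_only
-- ===== SOURCE A (Python) =====
-- def prefers_web_only(question: str) -> bool:
--     q = question.strip().lower()
--     if not q:
--         return False
--
--     web_only_markers = [
--         "online",
--         "web",
--         "internet",
--         "search online",
--         "search the web",
--         "from online",
--         "from the web",
--         "not qdrant",
--         "not the qdrant",
--         "not qdrant database",
--         "outside qdrant",
--         "instead of qdrant",
--     ]
--     return any(marker in q for marker in web_only_markers)
-- ===== SOURCE B (Python) =====
-- WEB_ONLY_MARKERS = [
--     "online",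
--     "web",
--     "internet",
--     "search online",
--     "search the web",
--     "from online",
--     "from the web",
--     "not qdrant",
--     "not the qdrant",
--     "not qdrant database",
--     "outside qdrant",
--     "instead of qdrant",
-- ]
--
--
-- def prefers_web_only(question: str) -> bool:
--     # Single left-to-right scan: at each position check whether any marker starts there.
--     q = question.strip().lower()
--     return any(q.startswith(m, i) for i in range(len(q)) for m in WEB_ONLY_MARKERS)
-- ===== Notes on version B (the rewrite author's own statement) =====
-- stated objective: alternative
-- what changed: Replaces twelve independent substring-containment scans ('marker in q' per marker) by one position-major left-to-right scan that checks at each index whether any marker starts there, and drops the explicit empty-string guard (an empty range yields False).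
import Mathlib
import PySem

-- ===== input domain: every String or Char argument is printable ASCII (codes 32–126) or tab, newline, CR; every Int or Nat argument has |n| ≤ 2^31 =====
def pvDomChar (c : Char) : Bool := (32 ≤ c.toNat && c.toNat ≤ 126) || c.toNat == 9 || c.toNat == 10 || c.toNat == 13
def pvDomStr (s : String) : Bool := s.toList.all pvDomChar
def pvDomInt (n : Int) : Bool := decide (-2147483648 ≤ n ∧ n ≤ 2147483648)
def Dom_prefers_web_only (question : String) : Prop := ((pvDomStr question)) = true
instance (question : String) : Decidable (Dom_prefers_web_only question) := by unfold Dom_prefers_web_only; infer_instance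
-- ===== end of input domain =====

-- B replaces A's twelve separate 'marker in q' substring scans by one position-major
-- left-to-right scan (at each index: does some marker start here?), dropping the empty guard.

-- the shared marker list (Python's web_only_markers / WEB_ONLY_MARKERS), as lists of chars
def pvMarkers : List (List Char) :=
  ["online".toList, "web".toList, "internet".toList, "search online".toList,
   "search the web".toList, "from online".toList, "from the web".toList,
   "not qdrant".toList, "not the qdrant".toList, "not qdrant database".toList,
   "outside qdrant".toList, "instead of qdrant".toList]

-- ===== PORT A =====
-- q = question.strip().lower(); if not q: return False; return any(marker in q for marker in markers)
def prefers_web_only (question : String) : Bool :=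
  let q := PySem.Chars.lower (PySem.Chars.strip question.toList)
  if q.isEmpty then false
  else pvMarkers.any (fun m => PySem.Chars.isIn m q)

-- ===== PORT B =====
-- any(q.startswith(m, i) for i in range(len(q)) for m in MARKERS): one scan over positions
def pvScan : List Char → Bool
  | [] => false
  | c :: rest => pvMarkers.any (fun m => PySem.Chars.startswith (c :: rest) m) || pvScan rest

def prefers_web_only_alt (question : String) : Bool :=
  pvScan (PySem.Chars.lower (PySem.Chars.strip question.toList))

-- ===== PRECONDITION & SPEC =====
def Spec_prefers_web_only (question : String) (out : Bool) : Prop := out = prefers_web_only_alt question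
instance (question : String) (out : Bool) : Decidable (Spec_prefers_web_only question out) := by unfold Spec_prefers_web_only; infer_instance

-- ===== CLAIM (what is proved, stated in full; the proofs are below) =====
def Claim_equal_prefers_web_only : Prop := ∀ (question : String), Dom_prefers_web_only question → Spec_prefers_web_only question (prefers_web_only question)

-- ===== LEMMAS AND PROOFS =====

theorem pvMarkers_ne_nil : ∀ m ∈ pvMarkers, m ≠ [] := by decide

-- B's scan finds a marker iff some marker is a prefix of some suffix
theorem pvScan_iff (s : List Char) :
    pvScan s = true ↔ ∃ m ∈ pvMarkers, ∃ j, m <+: s.drop j := by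
  induction s with
  | nil =>
    simp only [pvScan]
    constructor
    · intro h; exact absurd h (by decide)
    · rintro ⟨m, hm, j, hp⟩
      simp only [List.drop_nil] at hp
      exact absurd (List.prefix_nil.mp hp) (pvMarkers_ne_nil m hm)
  | cons c rest ih =>
    simp only [pvScan, Bool.or_eq_true, List.any_eq_true, ih]
    constructor
    · rintro (⟨m, hm, hs⟩ | ⟨m, hm, j, hp⟩)
      · exact ⟨m, hm, 0, by simpa [PySem.Chars.startswith_iff] using hs⟩
      · exact ⟨m, hm, j + 1, by simpa using hp⟩
    · rintro ⟨m, hm, j, hp⟩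
      cases j with
      | zero => exact Or.inl ⟨m, hm, by simpa [PySem.Chars.startswith_iff] using hp⟩
      | succ j => exact Or.inr ⟨m, hm, j, by simpa using hp⟩

-- ===== VERDICT (by name: the statement is the Claim_ definition above) =====
theorem prefers_web_only_spec : Claim_equal_prefers_web_only := by
  intro question _
  unfold Spec_prefers_web_only prefers_web_only prefers_web_only_alt
  set q := PySem.Chars.lower (PySem.Chars.strip question.toList) with hq
  cases hqe : q.isEmpty with
  | true =>
    rw [List.isEmpty_iff] at hqe
    simp [hqe, pvScan]
  | false =>
    rw [if_neg (by simp [hqe])]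
    rcases Bool.eq_false_or_eq_true (pvScan q) with h | h
    · rw [h]
      rcases (pvScan_iff q).mp h with ⟨m, hm, j, hp⟩
      refine List.any_eq_true.mpr ⟨m, hm, ?_⟩
      exact (PySem.Chars.exists_prefix_drop_iff_isIn m q).mp ⟨j, hp⟩
    · rw [h, Bool.eq_false_iff]
      intro hany
      rcases List.any_eq_true.mp hany with ⟨m, hm, hin⟩
      rcases (PySem.Chars.exists_prefix_drop_iff_isIn m q).mpr hin with ⟨j, hp⟩
      exact absurd ((pvScan_iff q).mpr ⟨m, hm, j, hp⟩) (by simp [h])
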